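-- pv_equiv track=rewrite | github.com/Belerafon/CookaReq | app/config.py | _initial_column_order
-- ===== SOURCE A (Python) =====
-- from collections.abc import Sequence
--
-- _FIRST_RUN_COLUMN_PRIORITY: tuple[str, ...] = (
--     "id",
--     "title",
--     "source",
--     "status",
--     "labels",
-- )
--
-- def _initial_column_order(columns: Sequence[str]) -> list[str]:
--     """Return logical column order for freshly initialised configs."""
--
--     order: list[str] = []
--     seen: set[str] = set()
--     for field in _FIRST_RUN_COLUMN_PRIORITY:
--         if field == "title":
--             if field not in seen:
--                 order.append(field)
--                 seen.add(field)
--             continue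
--         if field in columns and field not in seen:
--             order.append(field)
--             seen.add(field)
--     for field in columns:
--         if field not in seen:
--             order.append(field)
--             seen.add(field)
--     return order
-- ===== SOURCE B (Python) =====
-- _FIRST_RUN_COLUMN_PRIORITY: tuple[str, ...] = (
--     "id",
--     "title",
--     "source",
--     "status",
--     "labels",
-- )
--
--
-- def _initial_column_order(columns):
--     """Return logical column order for freshly initialised configs."""
--     rank = {f: i for i, f in enumerate(_FIRST_RUN_COLUMN_PRIORITY)}
--     unique = list(dict.fromkeys(["title", *columns]))
--     return sorted(unique, key=lambda f: rank.get(f, len(_FIRST_RUN_COLUMN_PRIORITY)))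
-- ===== Notes on version B (the rewrite author's own statement) =====
-- stated objective: alternative
-- what changed: Replaces A's two interleaved append-and-mark loops over an explicit seen-set with rank-and-sort: deduplicate 'title' plus the columns once, then stably sort by a rank table mapping priority fields to their index (unknown fields get the sentinel rank 5, so stability keeps their original order).
import Mathlib
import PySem

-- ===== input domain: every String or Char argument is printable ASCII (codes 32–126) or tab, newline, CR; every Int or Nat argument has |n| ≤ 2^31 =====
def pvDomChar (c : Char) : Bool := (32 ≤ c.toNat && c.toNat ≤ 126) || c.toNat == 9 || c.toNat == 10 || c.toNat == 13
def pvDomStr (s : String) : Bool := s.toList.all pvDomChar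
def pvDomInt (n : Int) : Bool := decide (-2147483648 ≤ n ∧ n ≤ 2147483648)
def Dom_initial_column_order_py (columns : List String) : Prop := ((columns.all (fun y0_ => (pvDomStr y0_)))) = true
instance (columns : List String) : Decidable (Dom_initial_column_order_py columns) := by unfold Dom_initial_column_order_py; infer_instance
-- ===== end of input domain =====

-- B replaces A's two interleaved append-and-mark loops with rank-and-sort: deduplicate
-- "title" plus the columns once, then stably sort by a rank table (unknown fields get
-- the sentinel rank 5, so stability keeps their original order). Alternative algorithm.

-- module constant _FIRST_RUN_COLUMN_PRIORITY
def firstRunColumnPriority : List String := ["id", "title", "source", "status", "labels"]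

-- ===== PORT A =====
-- state = (order, seen); Python's set is PySem.Set
def aPriorityStep (columns : List String) (st : List String × PySem.Set String) (field : String) :
    List String × PySem.Set String :=
  if field == "title" then
    if PySem.Set.contains st.2 field then st
    else (st.1 ++ [field], PySem.Set.add st.2 field)
  else if columns.contains field && !(PySem.Set.contains st.2 field) then
    (st.1 ++ [field], PySem.Set.add st.2 field)
  else st

def aColumnStep (st : List String × PySem.Set String) (field : String) :
    List String × PySem.Set String :=
  if PySem.Set.contains st.2 field then st
  else (st.1 ++ [field], PySem.Set.add st.2 field)

def initial_column_order_py (columns : List String) : List String :=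
  let st1 := firstRunColumnPriority.foldl (aPriorityStep columns) ([], PySem.Set.empty)
  let st2 := columns.foldl aColumnStep st1
  st2.1

-- ===== PORT B =====
-- rank = {f: i for i, f in enumerate(_FIRST_RUN_COLUMN_PRIORITY)}
def rankDict : PySem.Dict String Int :=
  (PySem.List.enumerate firstRunColumnPriority).foldl
    (fun d p => d.insert p.2 p.1) PySem.Dict.empty

def initial_column_order_py_alt (columns : List String) : List String :=
  let unique := PySem.List.dedup ("title" :: columns)
  PySem.List.sorted unique
    (fun f => PySem.Dict.getD rankDict f (firstRunColumnPriority.length : Int))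

-- ===== PRECONDITION & SPEC =====
def Spec_initial_column_order_py (columns : List String) (out : List String) : Prop := out = initial_column_order_py_alt columns
instance (columns : List String) (out : List String) : Decidable (Spec_initial_column_order_py columns out) := by unfold Spec_initial_column_order_py; infer_instance

-- ===== CLAIM (what is proved, stated in full; the proofs are below) =====
def Claim_equal_initial_column_order_py : Prop := ∀ (columns : List String), Dom_initial_column_order_py columns → Spec_initial_column_order_py columns (initial_column_order_py columns)

-- ===== LEMMAS AND PROOFS =====

-- B's sort key, as the port's lambda
def keyF (f : String) : Int :=
  PySem.Dict.getD rankDict f (firstRunColumnPriority.length : Int)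

theorem keyF_eq (f : String) :
    keyF f = if f = "id" then 0 else if f = "title" then 1 else if f = "source" then 2
             else if f = "status" then 3 else if f = "labels" then 4 else 5 := by
  have h : rankDict = PySem.Dict.mk [("id",0),("title",1),("source",2),("status",3),("labels",4)] := by decide
  by_cases h1 : f = "id"
  · subst h1; decide
  by_cases h2 : f = "title"
  · subst h2; decide
  by_cases h3 : f = "source"
  · subst h3; decide
  by_cases h4 : f = "status"
  · subst h4; decide
  by_cases h5 : f = "labels"
  · subst h5; decide
  rw [if_neg h1, if_neg h2, if_neg h3, if_neg h4, if_neg h5]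
  unfold keyF
  rw [h]
  simp only [PySem.Dict.getD, PySem.Dict.get?_mk_cons, beq_iff_eq]
  rw [if_neg (Ne.symm h1), if_neg (Ne.symm h2), if_neg (Ne.symm h3), if_neg (Ne.symm h4), if_neg (Ne.symm h5)]
  simp [PySem.Dict.get?, firstRunColumnPriority]

-- ---- A's phase-1 loop keeps order = seen (diagonal state) ----
theorem aPriorityStep_diag (columns : List String) (s : PySem.Set String) (field : String) :
    aPriorityStep columns (s, s) field =
      (if field == "title" || columns.contains field then (PySem.Set.add s field, PySem.Set.add s field)
       else (s, s)) := by
  simp only [aPriorityStep, PySem.Set.add, PySem.Set.contains]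
  split_ifs <;> simp_all

theorem foldl_aPriority_diag (columns l : List String) (s : PySem.Set String) :
    l.foldl (aPriorityStep columns) (s, s) =
      (l.foldl (fun t f => if f == "title" || columns.contains f then PySem.Set.add t f else t) s,
       l.foldl (fun t f => if f == "title" || columns.contains f then PySem.Set.add t f else t) s) := by
  induction l generalizing s with
  | nil => rfl
  | cons f l ih =>
      simp only [List.foldl_cons, aPriorityStep_diag]
      split_ifs <;> simp_all

theorem aColumnStep_diag (s : PySem.Set String) (field : String) :
    aColumnStep (s, s) field = (PySem.Set.add s field, PySem.Set.add s field) := by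
  simp only [aColumnStep, PySem.Set.add, PySem.Set.contains]
  split_ifs <;> simp_all

theorem foldl_aColumn_diag (l : List String) (s : PySem.Set String) :
    l.foldl aColumnStep (s, s) = (l.foldl PySem.Set.add s, l.foldl PySem.Set.add s) := by
  induction l generalizing s with
  | nil => rfl
  | cons f l ih => simp only [List.foldl_cons, aColumnStep_diag, ih]

-- explicit value of A's phase-1 result
def pExp (columns : List String) : List String :=
  (if columns.contains "id" then ["id"] else []) ++ ["title"] ++
  (if columns.contains "source" then ["source"] else []) ++
  (if columns.contains "status" then ["status"] else []) ++
  (if columns.contains "labels" then ["labels"] else [])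

theorem phase1_eq (columns : List String) :
    firstRunColumnPriority.foldl
      (fun t f => if f == "title" || columns.contains f then PySem.Set.add t f else t)
      ([] : List String) = pExp columns := by
  by_cases h1 : "id" ∈ columns <;>
  by_cases h2 : "source" ∈ columns <;>
  by_cases h3 : "status" ∈ columns <;>
  by_cases h4 : "labels" ∈ columns <;>
    simp [firstRunColumnPriority, pExp, PySem.Set.add, PySem.Set.contains, h1, h2, h3, h4]

-- ---- stable-sort bucket machinery ----
def ins (x : String) (l : List String) : List String :=
  PySem.List.insertBy (fun a b => decide (keyF a < keyF b)) x l

def bk (k : Int) (xs : List String) : List String :=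
  xs.filter (fun f => decide (keyF f = k))

theorem ins_append_left (x : String) (A B : List String)
    (h : ∀ a ∈ A, keyF a ≤ keyF x) : ins x (A ++ B) = A ++ ins x B := by
  induction A with
  | nil => simp
  | cons a A ih =>
      have ha : keyF a ≤ keyF x := h a (by simp)
      simp only [List.cons_append, ins, PySem.List.insertBy]
      rw [if_neg (by simp; omega)]
      simp only [ins] at ih
      rw [ih (fun b hb => h b (by simp [hb]))]

theorem ins_all_gt (x : String) (B : List String)
    (h : ∀ b ∈ B, keyF x < keyF b) : ins x B = x :: B := by
  cases B with
  | nil => rfl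
  | cons b B =>
      have hb : keyF x < keyF b := h b (by simp)
      simp only [ins, PySem.List.insertBy]
      rw [if_pos (by simpa using hb)]

theorem ins_step (x : String) (A B : List String)
    (hA : ∀ a ∈ A, keyF a ≤ keyF x) (hB : ∀ b ∈ B, keyF x < keyF b) :
    ins x (A ++ B) = A ++ x :: B := by
  rw [ins_append_left x A B hA, ins_all_gt x B hB]

theorem keyF_bounds (f : String) : 0 ≤ keyF f ∧ keyF f ≤ 5 := by
  rw [keyF_eq]; split_ifs <;> norm_num

theorem mem_bk (k : Int) (a : String) (xs : List String) (ha : a ∈ bk k xs) : keyF a = k := by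
  unfold bk at ha
  simp only [List.mem_filter, decide_eq_true_eq] at ha
  exact ha.2

theorem bk_append_single (k : Int) (xs : List String) (x : String) :
    bk k (xs ++ [x]) = bk k xs ++ if keyF x = k then [x] else [] := by
  unfold bk
  rw [List.filter_append]
  congr 1
  by_cases h : keyF x = k <;> simp [h]

theorem sorted_buckets (xs : List String) :
    PySem.List.sorted xs keyF =
      bk 0 xs ++ (bk 1 xs ++ (bk 2 xs ++ (bk 3 xs ++ (bk 4 xs ++ bk 5 xs)))) := by
  induction xs using List.reverseRecOn with
  | nil =>
      rw [PySem.List.sorted_eq_foldl_insertBy]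
      simp [bk]
  | append_singleton xs x ih =>
      have hstep : PySem.List.sorted (xs ++ [x]) keyF = ins x (PySem.List.sorted xs keyF) := by
        rw [PySem.List.sorted_eq_foldl_insertBy, PySem.List.sorted_eq_foldl_insertBy,
          List.foldl_append]
        rfl
      rw [hstep, ih]
      have hb := keyF_bounds x
      have hx : keyF x = 0 ∨ keyF x = 1 ∨ keyF x = 2 ∨ keyF x = 3 ∨ keyF x = 4 ∨ keyF x = 5 := by
        omega
      rcases hx with h | h | h | h | h | h
      · rw [ins_step x (bk 0 xs) _
          (by intro a ha; have := mem_bk 0 a xs ha; omega)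
          (by
            intro b hb'
            simp only [List.mem_append] at hb'
            rcases hb' with h1 | h2 | h3 | h4 | h5
            · have := mem_bk 1 b xs h1; omega
            · have := mem_bk 2 b xs h2; omega
            · have := mem_bk 3 b xs h3; omega
            · have := mem_bk 4 b xs h4; omega
            · have := mem_bk 5 b xs h5; omega)]
        simp [bk_append_single, h]
      · rw [show bk 0 xs ++ (bk 1 xs ++ (bk 2 xs ++ (bk 3 xs ++ (bk 4 xs ++ bk 5 xs)))) =
              (bk 0 xs ++ bk 1 xs) ++ (bk 2 xs ++ (bk 3 xs ++ (bk 4 xs ++ bk 5 xs))) by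
            simp [List.append_assoc]]
        rw [ins_step x _ _
          (by
            intro a ha
            simp only [List.mem_append] at ha
            rcases ha with h0 | h1
            · have := mem_bk 0 a xs h0; omega
            · have := mem_bk 1 a xs h1; omega)
          (by
            intro b hb'
            simp only [List.mem_append] at hb'
            rcases hb' with h2 | h3 | h4 | h5
            · have := mem_bk 2 b xs h2; omega
            · have := mem_bk 3 b xs h3; omega
            · have := mem_bk 4 b xs h4; omega
            · have := mem_bk 5 b xs h5; omega)]
        simp [bk_append_single, h]
      · rw [show bk 0 xs ++ (bk 1 xs ++ (bk 2 xs ++ (bk 3 xs ++ (bk 4 xs ++ bk 5 xs)))) =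
              (bk 0 xs ++ bk 1 xs ++ bk 2 xs) ++ (bk 3 xs ++ (bk 4 xs ++ bk 5 xs)) by
            simp [List.append_assoc]]
        rw [ins_step x _ _
          (by
            intro a ha
            simp only [List.mem_append] at ha
            rcases ha with (h0 | h1) | h2
            · have := mem_bk 0 a xs h0; omega
            · have := mem_bk 1 a xs h1; omega
            · have := mem_bk 2 a xs h2; omega)
          (by
            intro b hb'
            simp only [List.mem_append] at hb'
            rcases hb' with h3 | h4 | h5
            · have := mem_bk 3 b xs h3; omega
            · have := mem_bk 4 b xs h4; omega
            · have := mem_bk 5 b xs h5; omega)]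
        simp [bk_append_single, h]
      · rw [show bk 0 xs ++ (bk 1 xs ++ (bk 2 xs ++ (bk 3 xs ++ (bk 4 xs ++ bk 5 xs)))) =
              (bk 0 xs ++ bk 1 xs ++ bk 2 xs ++ bk 3 xs) ++ (bk 4 xs ++ bk 5 xs) by
            simp [List.append_assoc]]
        rw [ins_step x _ _
          (by
            intro a ha
            simp only [List.mem_append] at ha
            rcases ha with ((h0 | h1) | h2) | h3
            · have := mem_bk 0 a xs h0; omega
            · have := mem_bk 1 a xs h1; omega
            · have := mem_bk 2 a xs h2; omega
            · have := mem_bk 3 a xs h3; omega)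
          (by
            intro b hb'
            simp only [List.mem_append] at hb'
            rcases hb' with h4 | h5
            · have := mem_bk 4 b xs h4; omega
            · have := mem_bk 5 b xs h5; omega)]
        simp [bk_append_single, h]
      · rw [show bk 0 xs ++ (bk 1 xs ++ (bk 2 xs ++ (bk 3 xs ++ (bk 4 xs ++ bk 5 xs)))) =
              (bk 0 xs ++ bk 1 xs ++ bk 2 xs ++ bk 3 xs ++ bk 4 xs) ++ bk 5 xs by
            simp [List.append_assoc]]
        rw [ins_step x _ _
          (by
            intro a ha
            simp only [List.mem_append] at ha
            rcases ha with (((h0 | h1) | h2) | h3) | h4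
            · have := mem_bk 0 a xs h0; omega
            · have := mem_bk 1 a xs h1; omega
            · have := mem_bk 2 a xs h2; omega
            · have := mem_bk 3 a xs h3; omega
            · have := mem_bk 4 a xs h4; omega)
          (by
            intro b hb'
            have := mem_bk 5 b xs hb'; omega)]
        simp [bk_append_single, h]
      · rw [show bk 0 xs ++ (bk 1 xs ++ (bk 2 xs ++ (bk 3 xs ++ (bk 4 xs ++ bk 5 xs)))) =
              (bk 0 xs ++ bk 1 xs ++ bk 2 xs ++ bk 3 xs ++ bk 4 xs ++ bk 5 xs) ++ [] by
            simp [List.append_assoc]]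
        rw [ins_step x _ _
          (by
            intro a ha
            simp only [List.mem_append] at ha
            rcases ha with ((((h0 | h1) | h2) | h3) | h4) | h5
            · have := mem_bk 0 a xs h0; omega
            · have := mem_bk 1 a xs h1; omega
            · have := mem_bk 2 a xs h2; omega
            · have := mem_bk 3 a xs h3; omega
            · have := mem_bk 4 a xs h4; omega
            · have := mem_bk 5 a xs h5; omega)
          (by intro b hb'; simp at hb')]
        simp [bk_append_single, h]

-- singleton filter on a nodup list
theorem filter_eq_of_nodup (a : String) (l : List String) (h : l.Nodup) :
    l.filter (fun f => decide (f = a)) = if a ∈ l then [a] else [] := by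
  induction l with
  | nil => simp
  | cons x xs ih =>
      simp only [List.nodup_cons] at h
      by_cases hx : x = a
      · subst hx
        simp [h.1, ih h.2]
      · simp only [List.filter_cons]
        rw [if_neg (by simp [hx])]
        rw [ih h.2]
        simp [List.mem_cons, Ne.symm hx]

theorem keyF_iff_0 (f : String) : keyF f = 0 ↔ f = "id" := by
  rw [keyF_eq]; split_ifs <;> simp_all

theorem keyF_iff_1 (f : String) : keyF f = 1 ↔ f = "title" := by
  rw [keyF_eq]; split_ifs <;> simp_all

theorem keyF_iff_2 (f : String) : keyF f = 2 ↔ f = "source" := by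
  rw [keyF_eq]; split_ifs <;> simp_all

theorem keyF_iff_3 (f : String) : keyF f = 3 ↔ f = "status" := by
  rw [keyF_eq]; split_ifs <;> simp_all

theorem keyF_iff_4 (f : String) : keyF f = 4 ↔ f = "labels" := by
  rw [keyF_eq]; split_ifs <;> simp_all

-- A's result: phase-1 fields then the unseen columns in order
theorem a_eq (columns : List String) :
    initial_column_order_py columns =
      pExp columns ++
        (PySem.List.dedup columns).filter (fun f => !(PySem.Set.contains (pExp columns) f)) := by
  have hempty : (PySem.Set.empty : PySem.Set String) = ([] : List String) := rfl
  simp only [initial_column_order_py, hempty, foldl_aPriority_diag, foldl_aColumn_diag, phase1_eq]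
  rw [show List.foldl PySem.Set.add (pExp columns) columns
        = PySem.Set.update (pExp columns) columns from rfl,
    PySem.Set.update_eq_append_filter]
  simp [PySem.List.dedup_eq_ofList, PySem.Set.contains]

theorem uniq_eq (columns : List String) :
    PySem.List.dedup ("title" :: columns) =
      "title" :: (PySem.List.dedup columns).filter (fun f => !(PySem.Set.contains ["title"] f)) := by
  rw [PySem.List.dedup_eq_ofList, PySem.Set.ofList_eq_foldl, List.foldl_cons]
  rw [show PySem.Set.add ([] : List String) "title" = ["title"] from rfl]
  rw [show List.foldl PySem.Set.add ["title"] columns = PySem.Set.update ["title"] columns from rfl,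
    PySem.Set.update_eq_append_filter]
  simp [PySem.List.dedup_eq_ofList, PySem.Set.contains]

theorem nodup_uniq (columns : List String) : (PySem.List.dedup ("title" :: columns)).Nodup := by
  rw [PySem.List.dedup_eq_ofList]; exact PySem.Set.nodup_ofList _

theorem bk_known (columns : List String) (k : Int) (a : String)
    (hiff : ∀ f, keyF f = k ↔ f = a) (hat : a ≠ "title") :
    bk k (PySem.List.dedup ("title" :: columns)) = if a ∈ columns then [a] else [] := by
  unfold bk
  rw [List.filter_congr (fun f _ => decide_eq_decide.mpr (hiff f))]
  rw [filter_eq_of_nodup a _ (nodup_uniq columns)]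
  simp [hat]

theorem bk1_uniq (columns : List String) :
    bk 1 (PySem.List.dedup ("title" :: columns)) = ["title"] := by
  unfold bk
  rw [List.filter_congr (fun f _ => decide_eq_decide.mpr (keyF_iff_1 f))]
  rw [filter_eq_of_nodup "title" _ (nodup_uniq columns)]
  simp

theorem bk5_uniq (columns : List String) :
    bk 5 (PySem.List.dedup ("title" :: columns)) =
      (PySem.List.dedup columns).filter (fun f => decide (keyF f = 5)) := by
  unfold bk
  rw [uniq_eq columns]
  rw [List.filter_cons_of_neg (by simp [show keyF "title" = 1 from by decide])]
  rw [List.filter_filter]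
  apply List.filter_congr
  intro f _
  by_cases h : keyF f = 5
  · have ht : f ≠ "title" := by
      intro he; rw [he] at h; exact absurd h (by decide)
    simp [h, PySem.Set.contains, ht]
  · simp [h]

theorem tail_congr (columns : List String) :
    (PySem.List.dedup columns).filter (fun f => !(PySem.Set.contains (pExp columns) f)) =
      (PySem.List.dedup columns).filter (fun f => decide (keyF f = 5)) := by
  apply List.filter_congr
  intro f hf
  have hfc : f ∈ columns := (PySem.List.mem_dedup _ _).mp hf
  by_cases h1 : f = "id"
  · subst h1; simp [pExp, PySem.Set.contains, hfc, keyF_eq]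
  by_cases h2 : f = "title"
  · subst h2; simp [pExp, PySem.Set.contains, keyF_eq]
  by_cases h3 : f = "source"
  · subst h3; simp [pExp, PySem.Set.contains, hfc, keyF_eq]
  by_cases h4 : f = "status"
  · subst h4; simp [pExp, PySem.Set.contains, hfc, keyF_eq]
  by_cases h5 : f = "labels"
  · subst h5; simp [pExp, PySem.Set.contains, hfc, keyF_eq]
  · simp [pExp, PySem.Set.contains, keyF_eq, h1, h2, h3, h4, h5]

-- ===== VERDICT (by name: the statement is the Claim_ definition above) =====
theorem initial_column_order_py_spec : Claim_equal_initial_column_order_py := by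
  intro columns _
  show initial_column_order_py columns = initial_column_order_py_alt columns
  have halt : initial_column_order_py_alt columns =
      PySem.List.sorted (PySem.List.dedup ("title" :: columns)) keyF := rfl
  rw [a_eq columns, tail_congr columns, halt, sorted_buckets,
    bk_known columns 0 "id" keyF_iff_0 (by decide),
    bk1_uniq columns,
    bk_known columns 2 "source" keyF_iff_2 (by decide),
    bk_known columns 3 "status" keyF_iff_3 (by decide),
    bk_known columns 4 "labels" keyF_iff_4 (by decide),
    bk5_uniq columns]
  by_cases h1 : "id" ∈ columns <;>
  by_cases h2 : "source" ∈ columns <;>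
  by_cases h3 : "status" ∈ columns <;>
  by_cases h4 : "labels" ∈ columns <;>
    simp [pExp, h1, h2, h3, h4]
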